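-- pv_equiv track=rewrite | github.com/PayamFardRepo/DermaIntel | backend/insurance_preauth.py | get_recommended_procedures
-- ===== SOURCE A (Python) =====
-- from typing import Dict, List, Optional, Any
--
-- CPT_CODES = {
--     "biopsy_skin": "11102",
--     "biopsy_additional": "11103",
--     "excision_benign_0.5cm": "11400",
--     "excision_benign_1.0cm": "11401",
--     "excision_benign_2.0cm": "11402",
--     "excision_malignant_0.5cm": "11600",
--     "excision_malignant_1.0cm": "11601",
--     "excision_malignant_2.0cm": "11602",
--     "destruction_benign_1": "17110",
--     "destruction_benign_2-14": "17111",
--     "destruction_malignant_0.5cm": "17260",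
--     "destruction_malignant_1.0cm": "17261",
--     "dermoscopy": "96999",
--     "photography": "96904",
--     "phototherapy": "96912",
-- }
--
-- def get_recommended_procedures(condition: str, severity: Optional[str] = None) -> List[Dict[str, str]]:
--     """Get recommended procedures based on condition."""
--     condition_lower = condition.lower()
--     procedures = []
--
--     # Always recommend dermoscopy and photography for documentation
--     procedures.append({
--         "code": CPT_CODES["dermoscopy"],
--         "description": "Dermoscopic examination",
--         "rationale": "Non-invasive examination technique to evaluate skin lesion characteristics"
--     })
--
--     procedures.append({
--         "code": CPT_CODES["photography"],
--         "description": "Clinical photography",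
--         "rationale": "Documentation for monitoring and comparison over time"
--     })
--
--     # Malignant or suspicious conditions
--     if any(term in condition_lower for term in ["melanoma", "carcinoma", "malignant", "cancer"]):
--         procedures.append({
--             "code": CPT_CODES["biopsy_skin"],
--             "description": "Skin biopsy",
--             "rationale": "Tissue diagnosis required for definitive diagnosis and treatment planning"
--         })
--         procedures.append({
--             "code": CPT_CODES["excision_malignant_1.0cm"],
--             "description": "Excision of malignant lesion",
--             "rationale": "Complete excision with adequate margins for curative treatment"
--         })
--
--     # Premalignant conditions
--     elif "actinic keratosis" in condition_lower:
--         procedures.append({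
--             "code": CPT_CODES["destruction_benign_1"],
--             "description": "Destruction of premalignant lesion",
--             "rationale": "Treatment to prevent progression to squamous cell carcinoma"
--         })
--
--     # Benign but symptomatic lesions
--     elif any(term in condition_lower for term in ["seborrheic keratosis", "benign"]):
--         if severity and "symptomatic" in severity.lower():
--             procedures.append({
--                 "code": CPT_CODES["excision_benign_1.0cm"],
--                 "description": "Excision of benign lesion",
--                 "rationale": "Removal indicated for symptomatic relief or cosmetic concerns"
--             })
--
--     # Inflammatory conditions
--     elif any(term in condition_lower for term in ["dermatitis", "eczema", "psoriasis"]):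
--         procedures.append({
--             "code": CPT_CODES["phototherapy"],
--             "description": "Phototherapy",
--             "rationale": "Evidence-based treatment for moderate to severe inflammatory skin conditions"
--         })
--         procedures.append({
--             "code": CPT_CODES["biopsy_skin"],
--             "description": "Skin biopsy",
--             "rationale": "Histopathologic confirmation if diagnosis uncertain or treatment-resistant"
--         })
--
--     # Infectious conditions
--     elif any(term in condition_lower for term in ["infection", "cellulitis", "abscess"]):
--         procedures.append({
--             "code": CPT_CODES["biopsy_skin"],
--             "description": "Skin biopsy with culture",
--             "rationale": "Identification of causative organism for targeted antimicrobial therapy"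
--         })
--
--     return procedures
-- ===== SOURCE B (Python) =====
-- from typing import Dict, List, Optional, Any
--
-- CPT_CODES = {
--     "biopsy_skin": "11102",
--     "biopsy_additional": "11103",
--     "excision_benign_0.5cm": "11400",
--     "excision_benign_1.0cm": "11401",
--     "excision_benign_2.0cm": "11402",
--     "excision_malignant_0.5cm": "11600",
--     "excision_malignant_1.0cm": "11601",
--     "excision_malignant_2.0cm": "11602",
--     "destruction_benign_1": "17110",
--     "destruction_benign_2-14": "17111",
--     "destruction_malignant_0.5cm": "17260",
--     "destruction_malignant_1.0cm": "17261",
--     "dermoscopy": "96999",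
--     "photography": "96904",
--     "phototherapy": "96912",
-- }
--
-- def _proc(key, description, rationale):
--     return {"code": CPT_CODES[key], "description": description, "rationale": rationale}
--
-- # Flat keyword -> category-priority map (0 = most urgent).  Unlike a first-match
-- # rule chain, B scans ALL keywords, takes the minimum priority among those that
-- # occur in the lowered condition, and only then emits the procedures for that
-- # single winning category.  Priorities reproduce the if/elif precedence.
-- _KEYWORD_PRIORITY = [
--     ("melanoma", 0), ("carcinoma", 0), ("malignant", 0), ("cancer", 0),
--     ("actinic keratosis", 1),
--     ("seborrheic keratosis", 2), ("benign", 2),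
--     ("dermatitis", 3), ("eczema", 3), ("psoriasis", 3),
--     ("infection", 4), ("cellulitis", 4), ("abscess", 4),
-- ]
--
-- def get_recommended_procedures(condition: str, severity: Optional[str] = None) -> List[Dict[str, str]]:
--     """Get recommended procedures based on condition."""
--     condition_lower = condition.lower()
--     procedures = [
--         _proc("dermoscopy", "Dermoscopic examination",
--               "Non-invasive examination technique to evaluate skin lesion characteristics"),
--         _proc("photography", "Clinical photography",
--               "Documentation for monitoring and comparison over time"),
--     ]
--     best = min((p for kw, p in _KEYWORD_PRIORITY if kw in condition_lower), default=None)
--     if best == 0: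
--         procedures.append(_proc("biopsy_skin", "Skin biopsy",
--             "Tissue diagnosis required for definitive diagnosis and treatment planning"))
--         procedures.append(_proc("excision_malignant_1.0cm", "Excision of malignant lesion",
--             "Complete excision with adequate margins for curative treatment"))
--     elif best == 1:
--         procedures.append(_proc("destruction_benign_1", "Destruction of premalignant lesion",
--             "Treatment to prevent progression to squamous cell carcinoma"))
--     elif best == 2:
--         if severity and "symptomatic" in severity.lower():
--             procedures.append(_proc("excision_benign_1.0cm", "Excision of benign lesion",
--                 "Removal indicated for symptomatic relief or cosmetic concerns"))
--     elif best == 3: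
--         procedures.append(_proc("phototherapy", "Phototherapy",
--             "Evidence-based treatment for moderate to severe inflammatory skin conditions"))
--         procedures.append(_proc("biopsy_skin", "Skin biopsy",
--             "Histopathologic confirmation if diagnosis uncertain or treatment-resistant"))
--     elif best == 4:
--         procedures.append(_proc("biopsy_skin", "Skin biopsy with culture",
--             "Identification of causative organism for targeted antimicrobial therapy"))
--     return procedures
-- ===== Notes on version B (the rewrite author's own statement) =====
-- stated objective: alternative
-- what changed: Instead of a short-circuiting if/elif chain of group membership tests, B scans a flat keyword->priority map exhaustively, takes the minimum priority among all keywords occurring in the lowered condition, and dispatches once on that winning category.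
import Mathlib
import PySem

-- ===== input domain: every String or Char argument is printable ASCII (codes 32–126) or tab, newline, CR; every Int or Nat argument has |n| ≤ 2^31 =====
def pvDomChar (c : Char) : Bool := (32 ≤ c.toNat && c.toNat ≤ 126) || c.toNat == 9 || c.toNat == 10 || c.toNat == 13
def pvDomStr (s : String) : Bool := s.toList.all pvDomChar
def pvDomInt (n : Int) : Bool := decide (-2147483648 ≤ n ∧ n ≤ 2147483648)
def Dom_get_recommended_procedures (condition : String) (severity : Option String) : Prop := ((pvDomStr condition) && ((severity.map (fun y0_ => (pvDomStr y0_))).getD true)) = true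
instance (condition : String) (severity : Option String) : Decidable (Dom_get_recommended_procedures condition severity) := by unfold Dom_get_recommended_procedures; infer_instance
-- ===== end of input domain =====

-- ===== PORT A =====
-- B replaces the short-circuiting if/elif chain with an exhaustive keyword->priority
-- scan that takes the minimum matched priority and dispatches once; objective: alternative (same cost).
def pvCPT : PySem.Dict String String := PySem.Dict.ofList [
  ("biopsy_skin", "11102"), ("biopsy_additional", "11103"),
  ("excision_benign_0.5cm", "11400"), ("excision_benign_1.0cm", "11401"),
  ("excision_benign_2.0cm", "11402"), ("excision_malignant_0.5cm", "11600"),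
  ("excision_malignant_1.0cm", "11601"), ("excision_malignant_2.0cm", "11602"),
  ("destruction_benign_1", "17110"), ("destruction_benign_2-14", "17111"),
  ("destruction_malignant_0.5cm", "17260"), ("destruction_malignant_1.0cm", "17261"),
  ("dermoscopy", "96999"), ("photography", "96904"), ("phototherapy", "96912")]

def get_recommended_procedures (condition : String) (severity : Option String) : List (List (String × String)) :=
  let condition_lower := PySem.Str.lower condition
  let procedures : List (List (String × String)) := []
  let procedures := procedures ++ [[("code", PySem.Dict.getD pvCPT "dermoscopy" ""),
    ("description", "Dermoscopic examination"),
    ("rationale", "Non-invasive examination technique to evaluate skin lesion characteristics")]]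
  let procedures := procedures ++ [[("code", PySem.Dict.getD pvCPT "photography" ""),
    ("description", "Clinical photography"),
    ("rationale", "Documentation for monitoring and comparison over time")]]
  if ["melanoma", "carcinoma", "malignant", "cancer"].any (fun term => PySem.Str.isIn term condition_lower) then
    procedures ++ [[("code", PySem.Dict.getD pvCPT "biopsy_skin" ""),
      ("description", "Skin biopsy"),
      ("rationale", "Tissue diagnosis required for definitive diagnosis and treatment planning")],
      [("code", PySem.Dict.getD pvCPT "excision_malignant_1.0cm" ""),
      ("description", "Excision of malignant lesion"),
      ("rationale", "Complete excision with adequate margins for curative treatment")]]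
  else if PySem.Str.isIn "actinic keratosis" condition_lower then
    procedures ++ [[("code", PySem.Dict.getD pvCPT "destruction_benign_1" ""),
      ("description", "Destruction of premalignant lesion"),
      ("rationale", "Treatment to prevent progression to squamous cell carcinoma")]]
  else if ["seborrheic keratosis", "benign"].any (fun term => PySem.Str.isIn term condition_lower) then
    -- 'if severity and "symptomatic" in severity.lower()': None and "" are falsy
    if (severity.elim false (fun s => !(s == "") && PySem.Str.isIn "symptomatic" (PySem.Str.lower s))) then
      procedures ++ [[("code", PySem.Dict.getD pvCPT "excision_benign_1.0cm" ""),
        ("description", "Excision of benign lesion"),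
        ("rationale", "Removal indicated for symptomatic relief or cosmetic concerns")]]
    else procedures
  else if ["dermatitis", "eczema", "psoriasis"].any (fun term => PySem.Str.isIn term condition_lower) then
    procedures ++ [[("code", PySem.Dict.getD pvCPT "phototherapy" ""),
      ("description", "Phototherapy"),
      ("rationale", "Evidence-based treatment for moderate to severe inflammatory skin conditions")],
      [("code", PySem.Dict.getD pvCPT "biopsy_skin" ""),
      ("description", "Skin biopsy"),
      ("rationale", "Histopathologic confirmation if diagnosis uncertain or treatment-resistant")]]
  else if ["infection", "cellulitis", "abscess"].any (fun term => PySem.Str.isIn term condition_lower) then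
    procedures ++ [[("code", PySem.Dict.getD pvCPT "biopsy_skin" ""),
      ("description", "Skin biopsy with culture"),
      ("rationale", "Identification of causative organism for targeted antimicrobial therapy")]]
  else procedures

-- ===== PORT B =====
def pvProc (key description rationale : String) : List (String × String) :=
  [("code", PySem.Dict.getD pvCPT key ""), ("description", description), ("rationale", rationale)]

-- flat keyword -> priority map (0 = most urgent); priorities mirror the clinical precedence
def pvKeywordPriority : List (String × Nat) := [
  ("melanoma", 0), ("carcinoma", 0), ("malignant", 0), ("cancer", 0),
  ("actinic keratosis", 1),
  ("seborrheic keratosis", 2), ("benign", 2),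
  ("dermatitis", 3), ("eczema", 3), ("psoriasis", 3),
  ("infection", 4), ("cellulitis", 4), ("abscess", 4)]

def pvMerge (acc : Option Nat) (p : Nat) : Option Nat :=
  match acc with | none => some p | some q => some (min q p)

def pvStep (cl : String) (acc : Option Nat) (kp : String × Nat) : Option Nat :=
  if PySem.Str.isIn kp.1 cl then pvMerge acc kp.2 else acc

-- 'min((p for kw, p in _KEYWORD_PRIORITY if kw in condition_lower), default=None)'
def pvBest (cl : String) : Option Nat := pvKeywordPriority.foldl (pvStep cl) none

def get_recommended_procedures_alt (condition : String) (severity : Option String) : List (List (String × String)) :=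
  let condition_lower := PySem.Str.lower condition
  let procedures :=
    [pvProc "dermoscopy" "Dermoscopic examination"
       "Non-invasive examination technique to evaluate skin lesion characteristics",
     pvProc "photography" "Clinical photography"
       "Documentation for monitoring and comparison over time"]
  procedures ++
    (match pvBest condition_lower with
     | some 0 =>
       [pvProc "biopsy_skin" "Skin biopsy"
          "Tissue diagnosis required for definitive diagnosis and treatment planning",
        pvProc "excision_malignant_1.0cm" "Excision of malignant lesion"
          "Complete excision with adequate margins for curative treatment"]
     | some 1 =>
       [pvProc "destruction_benign_1" "Destruction of premalignant lesion"
          "Treatment to prevent progression to squamous cell carcinoma"]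
     | some 2 =>
       if severity.elim false (fun s => !(s == "") && PySem.Str.isIn "symptomatic" (PySem.Str.lower s)) then
         [pvProc "excision_benign_1.0cm" "Excision of benign lesion"
            "Removal indicated for symptomatic relief or cosmetic concerns"]
       else []
     | some 3 =>
       [pvProc "phototherapy" "Phototherapy"
          "Evidence-based treatment for moderate to severe inflammatory skin conditions",
        pvProc "biopsy_skin" "Skin biopsy"
          "Histopathologic confirmation if diagnosis uncertain or treatment-resistant"]
     | some 4 =>
       [pvProc "biopsy_skin" "Skin biopsy with culture"
          "Identification of causative organism for targeted antimicrobial therapy"]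
     | _ => [])

-- ===== PRECONDITION & SPEC =====
def Spec_get_recommended_procedures (condition : String) (severity : Option String) (out : List (List (String × String))) : Prop := out = get_recommended_procedures_alt condition severity
instance (condition : String) (severity : Option String) (out : List (List (String × String))) : Decidable (Spec_get_recommended_procedures condition severity out) := by unfold Spec_get_recommended_procedures; infer_instance

-- ===== CLAIM (what is proved, stated in full; the proofs are below) =====
def Claim_equal_get_recommended_procedures : Prop := ∀ (condition : String) (severity : Option String), Dom_get_recommended_procedures condition severity → Spec_get_recommended_procedures condition severity (get_recommended_procedures condition severity)

-- ===== LEMMAS AND PROOFS =====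

-- each constant-priority segment of the fold collapses to one any-test
lemma pv_fold_g1 (cl : String) (acc : Option Nat) :
    List.foldl (pvStep cl) acc [("melanoma", 0), ("carcinoma", 0), ("malignant", 0), ("cancer", 0)] =
      if ["melanoma", "carcinoma", "malignant", "cancer"].any (fun term => PySem.Str.isIn term cl)
      then pvMerge acc 0 else acc := by
  simp only [List.foldl, pvStep, List.any_cons, List.any_nil, Bool.or_false]
  cases acc <;> split_ifs <;> simp_all [pvMerge]

lemma pv_fold_g2 (cl : String) (acc : Option Nat) :
    List.foldl (pvStep cl) acc [("actinic keratosis", 1)] =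
      if PySem.Str.isIn "actinic keratosis" cl then pvMerge acc 1 else acc := by
  simp only [List.foldl, pvStep]

lemma pv_fold_g3 (cl : String) (acc : Option Nat) :
    List.foldl (pvStep cl) acc [("seborrheic keratosis", 2), ("benign", 2)] =
      if ["seborrheic keratosis", "benign"].any (fun term => PySem.Str.isIn term cl)
      then pvMerge acc 2 else acc := by
  simp only [List.foldl, pvStep, List.any_cons, List.any_nil, Bool.or_false]
  cases acc <;> split_ifs <;> simp_all [pvMerge]

lemma pv_fold_g4 (cl : String) (acc : Option Nat) :
    List.foldl (pvStep cl) acc [("dermatitis", 3), ("eczema", 3), ("psoriasis", 3)] =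
      if ["dermatitis", "eczema", "psoriasis"].any (fun term => PySem.Str.isIn term cl)
      then pvMerge acc 3 else acc := by
  simp only [List.foldl, pvStep, List.any_cons, List.any_nil, Bool.or_false]
  cases acc <;> split_ifs <;> simp_all [pvMerge]

lemma pv_fold_g5 (cl : String) (acc : Option Nat) :
    List.foldl (pvStep cl) acc [("infection", 4), ("cellulitis", 4), ("abscess", 4)] =
      if ["infection", "cellulitis", "abscess"].any (fun term => PySem.Str.isIn term cl)
      then pvMerge acc 4 else acc := by
  simp only [List.foldl, pvStep, List.any_cons, List.any_nil, Bool.or_false]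
  cases acc <;> split_ifs <;> simp_all [pvMerge]

-- the minimum matched priority equals the first matching group of the elif chain
lemma pvBest_eq (cl : String) :
    pvBest cl =
      if ["melanoma", "carcinoma", "malignant", "cancer"].any (fun term => PySem.Str.isIn term cl) then some 0
      else if PySem.Str.isIn "actinic keratosis" cl then some 1
      else if ["seborrheic keratosis", "benign"].any (fun term => PySem.Str.isIn term cl) then some 2
      else if ["dermatitis", "eczema", "psoriasis"].any (fun term => PySem.Str.isIn term cl) then some 3
      else if ["infection", "cellulitis", "abscess"].any (fun term => PySem.Str.isIn term cl) then some 4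
      else none := by
  have h : pvKeywordPriority =
      [("melanoma", 0), ("carcinoma", 0), ("malignant", 0), ("cancer", 0)] ++
      [("actinic keratosis", 1)] ++
      [("seborrheic keratosis", 2), ("benign", 2)] ++
      [("dermatitis", 3), ("eczema", 3), ("psoriasis", 3)] ++
      [("infection", 4), ("cellulitis", 4), ("abscess", 4)] := rfl
  rw [pvBest, h, List.foldl_append, List.foldl_append, List.foldl_append, List.foldl_append,
    pv_fold_g1, pv_fold_g2, pv_fold_g3, pv_fold_g4, pv_fold_g5]
  split_ifs <;> rfl

-- ===== VERDICT (by name: the statement is the Claim_ definition above) =====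
theorem get_recommended_procedures_spec : Claim_equal_get_recommended_procedures := by
  intro condition severity _
  unfold Spec_get_recommended_procedures
  simp only [get_recommended_procedures, get_recommended_procedures_alt, pvBest_eq, pvProc]
  split_ifs <;> rfl
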